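-- pv_equiv track=rewrite | github.com/yunhuijang/MSR | util_cot.py | add_cot_to_target
-- ===== SOURCE A (Python) =====
-- TOTAL_COT_MODES = ['func_simple', 'func_smiles', 'scaffold', 'chain', 'fragment', 'ring', 'multiset_simple', \
--             'multiset_full', 'multiset_formula', 'multiset_type', 'aromatic', 'ring_name',  \
--             'con_ring_name', 'iupac', 'double_bond', 'chiral', 'weight', 'name', 'func_chem']
--
-- def add_cot_to_target(examples, targets, cot_mode):
--     cot_modes = cot_mode.split('-')
--     cot_modes.reverse()
--     for cm in cot_modes:
--         if cm == '':
--             break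
--         if cm not in TOTAL_COT_MODES:
--             raise ValueError(f"Invalid CoT mode: {cm}")
--
--         targets = [f"{cot}{target}" for target, cot in zip(targets, examples[f'cot_{cm}'])]
--
--
--     return targets
-- ===== SOURCE B (Python) =====
-- TOTAL_COT_MODES = ['func_simple', 'func_smiles', 'scaffold', 'chain', 'fragment', 'ring', 'multiset_simple', \
--             'multiset_full', 'multiset_formula', 'multiset_type', 'aromatic', 'ring_name',  \
--             'con_ring_name', 'iupac', 'double_bond', 'chiral', 'weight', 'name', 'func_chem']
--
-- def add_cot_to_target(examples, targets, cot_mode):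
--     # pass 1: collect the modes actually applied (reversed order, break at '', validate)
--     applied = []
--     for cm in reversed(cot_mode.split('-')):
--         if cm == '':
--             break
--         if cm not in TOTAL_COT_MODES:
--             raise ValueError(f"Invalid CoT mode: {cm}")
--         applied.append(cm)
--     cot_lists = [examples[f'cot_{cm}'] for cm in reversed(applied)]
--     n = min([len(targets)] + [len(l) for l in cot_lists])
--     # single row-wise pass: build each full prefix at once
--     return [''.join(l[i] for l in cot_lists) + targets[i] for i in range(n)]
-- ===== Notes on version B (the rewrite author's own statement) =====
-- stated objective: alternative
-- what changed: A rebuilds the whole targets list once per applied CoT mode (m zip-and-rebuild passes); B first collects the applied modes in one validation walk, computes the truncated length as a min, and builds each fully-prefixed target in a single row-wise pass.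
-- outside the precondition, e.g. on add_cot_to_target({}, ['t'], 'chain'): A raises KeyError, B raises KeyError; on add_cot_to_target({'cot_chain': ['c ']}, ['t'], 'bogus'): A raises ValueError, B raises ValueError
import Mathlib
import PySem

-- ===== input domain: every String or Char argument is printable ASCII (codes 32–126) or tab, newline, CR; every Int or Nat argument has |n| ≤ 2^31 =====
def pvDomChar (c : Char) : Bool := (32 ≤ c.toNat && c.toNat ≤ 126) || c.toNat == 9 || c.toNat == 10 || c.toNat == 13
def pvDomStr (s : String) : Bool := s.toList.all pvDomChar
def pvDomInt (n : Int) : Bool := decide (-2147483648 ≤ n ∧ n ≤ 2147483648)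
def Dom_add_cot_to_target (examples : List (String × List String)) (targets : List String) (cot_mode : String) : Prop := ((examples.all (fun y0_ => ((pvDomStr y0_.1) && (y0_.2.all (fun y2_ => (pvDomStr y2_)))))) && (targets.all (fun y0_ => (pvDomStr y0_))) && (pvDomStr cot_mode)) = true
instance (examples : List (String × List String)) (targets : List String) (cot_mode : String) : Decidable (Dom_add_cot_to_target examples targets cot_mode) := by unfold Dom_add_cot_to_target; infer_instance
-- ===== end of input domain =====

-- B replaces A's m successive zip-and-rebuild passes over the targets by one validation walk plus a
-- single row-wise pass that builds each full prefix at once (objective: alternative decomposition).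

-- ===== PORT A =====
def TOTAL_COT_MODES : List String := ["func_simple", "func_smiles", "scaffold", "chain", "fragment", "ring", "multiset_simple",
  "multiset_full", "multiset_formula", "multiset_type", "aromatic", "ring_name",
  "con_ring_name", "iupac", "double_bond", "chiral", "weight", "name", "func_chem"]

-- A's for-loop over the reversed mode list; on A's raise paths (ValueError / KeyError, both outside
-- Pre_) the port returns [].
def pvALoop (examples : List (String × List String)) : List String → List String → List String
  | [], targets => targets
  | cm :: rest, targets =>
    if cm = "" then targets
    else if ¬ TOTAL_COT_MODES.contains cm then []       -- raise ValueError (outside Pre_)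
    else match (PySem.Dict.ofList examples).get? ("cot_" ++ cm) with
      | none => []                                      -- KeyError (outside Pre_)
      | some cots => pvALoop examples rest (List.zipWith (fun target cot => cot ++ target) targets cots)

def add_cot_to_target (examples : List (String × List String)) (targets : List String) (cot_mode : String) : List String :=
  pvALoop examples (((PySem.Str.split? cot_mode "-").getD []).reverse) targets

-- ===== PORT B =====
-- Source B's pass 1: collect the applied modes; on the ValueError path (outside Pre_) it returns [].
def pvCollect : List String → List String
  | [] => []
  | cm :: rest =>
    if cm = "" then []
    else if ¬ TOTAL_COT_MODES.contains cm then []       -- raise ValueError (outside Pre_)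
    else cm :: pvCollect rest

def add_cot_to_target_alt (examples : List (String × List String)) (targets : List String) (cot_mode : String) : List String :=
  let applied := pvCollect (((PySem.Str.split? cot_mode "-").getD []).reverse)
  -- examples[f'cot_{cm}']; the KeyError path (outside Pre_) yields []
  let cotLists := applied.reverse.map (fun cm => ((PySem.Dict.ofList examples).get? ("cot_" ++ cm)).getD [])
  let n := cotLists.foldl (fun m l => min m l.length) targets.length
  (List.range n).map (fun i => (cotLists.foldl (fun s l => s ++ l.getD i "") "") ++ targets.getD i "")

-- ===== PRECONDITION & SPEC =====
-- Pre_ excludes exactly the inputs where A raises: a mode (before the first empty one) that is not in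
-- TOTAL_COT_MODES (ValueError) or whose 'cot_…' key is missing from examples (KeyError).
def Pre_add_cot_to_target (examples : List (String × List String)) (targets : List String) (cot_mode : String) : Prop :=
  ∀ cm ∈ (((PySem.Str.split? cot_mode "-").getD []).reverse).takeWhile (· ≠ ""),
    TOTAL_COT_MODES.contains cm = true ∧ ((PySem.Dict.ofList examples).get? ("cot_" ++ cm)).isSome = true
instance (examples : List (String × List String)) (targets : List String) (cot_mode : String) : Decidable (Pre_add_cot_to_target examples targets cot_mode) := by unfold Pre_add_cot_to_target; infer_instance

def pvWitness_add_cot_to_target : (List (String × List String)) × List String × String :=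
  ([("cot_chain", ["C1 ", "C2 "]), ("cot_ring", ["R "])], ["t0", "t1"], "ring-chain")

def Spec_add_cot_to_target (examples : List (String × List String)) (targets : List String) (cot_mode : String) (out : List String) : Prop := out = add_cot_to_target_alt examples targets cot_mode
instance (examples : List (String × List String)) (targets : List String) (cot_mode : String) (out : List String) : Decidable (Spec_add_cot_to_target examples targets cot_mode out) := by unfold Spec_add_cot_to_target; infer_instance

-- ===== CLAIM (what is proved, stated in full; the proofs are below) =====
def Claim_equal_add_cot_to_target : Prop := ∀ (examples : List (String × List String)) (targets : List String) (cot_mode : String), Dom_add_cot_to_target examples targets cot_mode → Pre_add_cot_to_target examples targets cot_mode → Spec_add_cot_to_target examples targets cot_mode (add_cot_to_target examples targets cot_mode)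

-- ===== LEMMAS AND PROOFS =====

theorem pv_witness_ok :
    Dom_add_cot_to_target pvWitness_add_cot_to_target.1 pvWitness_add_cot_to_target.2.1 pvWitness_add_cot_to_target.2.2 ∧
    Pre_add_cot_to_target pvWitness_add_cot_to_target.1 pvWitness_add_cot_to_target.2.1 pvWitness_add_cot_to_target.2.2 := by
  decide

-- min folded over a list commutes with a min in the initial value
theorem pv_foldl_min_comm (f : List String → Nat) (l : List (List String)) :
    ∀ a b : Nat, l.foldl (fun m x => min m (f x)) (min a b) = min (l.foldl (fun m x => min m (f x)) a) b := by
  induction l with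
  | nil => intro a b; rfl
  | cons x l ih =>
    intro a b
    simp only [List.foldl_cons]
    rw [Nat.min_right_comm a b (f x), ih]

theorem pv_getD_zipWith (as bs : List String) :
    ∀ i, i < as.length → i < bs.length →
      (List.zipWith (fun target cot => cot ++ target) as bs).getD i "" = bs.getD i "" ++ as.getD i "" := by
  induction as generalizing bs with
  | nil => intro i h _; simp at h
  | cons a as ih =>
    intro i h1 h2
    cases bs with
    | nil => simp at h2
    | cons b bs =>
      cases i with
      | zero => rfl
      | succ i =>
        simp only [List.zipWith_cons_cons, List.getD_cons_succ]
        exact ih bs i (by simpa using h1) (by simpa using h2)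

theorem pv_map_range_getD (xs : List String) :
    (List.range xs.length).map (fun i => xs.getD i "") = xs := by
  apply List.ext_getElem
  · simp
  · intro i h1 h2
    simp [List.getD_eq_getElem?_getD, List.getElem?_eq_getElem h2]

theorem pv_foldl_min_le_init (l : List (List String)) :
    ∀ a : Nat, l.foldl (fun m x => min m x.length) a ≤ a := by
  induction l with
  | nil => intro a; simp
  | cons x l ih => intro a; simp only [List.foldl_cons]; exact le_trans (ih _) (Nat.min_le_left _ _)

-- the loop of A equals B's one-pass build, for any suffix ms of the (reversed) mode list
theorem pv_loop_eq (examples : List (String × List String)) (ms : List String) :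
    ∀ targets : List String,
    (∀ cm ∈ ms.takeWhile (· ≠ ""),
        TOTAL_COT_MODES.contains cm = true ∧ ((PySem.Dict.ofList examples).get? ("cot_" ++ cm)).isSome = true) →
    pvALoop examples ms targets =
      (let cotLists := (pvCollect ms).reverse.map (fun cm => ((PySem.Dict.ofList examples).get? ("cot_" ++ cm)).getD [])
       let n := cotLists.foldl (fun m l => min m l.length) targets.length
       (List.range n).map (fun i => (cotLists.foldl (fun s l => s ++ l.getD i "") "") ++ targets.getD i "")) := by
  induction ms with
  | nil =>
    intro targets _
    simp only [pvALoop, pvCollect, List.reverse_nil, List.map_nil, List.foldl_nil]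
    rw [show (fun i => ("" : String) ++ targets.getD i "") = (fun i => targets.getD i "") from
        funext (fun i => by simp)]
    exact (pv_map_range_getD targets).symm
  | cons cm rest ih =>
    intro targets h
    by_cases hcm : cm = ""
    · subst hcm
      rw [show pvALoop examples ("" :: rest) targets = targets by simp [pvALoop],
          show pvCollect ("" :: rest) = [] by simp [pvCollect]]
      simp only [List.reverse_nil, List.map_nil, List.foldl_nil]
      rw [show (fun i => ("" : String) ++ targets.getD i "") = (fun i => targets.getD i "") from
          funext (fun i => by simp)]
      exact (pv_map_range_getD targets).symm
    · have hhd := h cm (by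
        rw [List.takeWhile_cons_of_pos (by simp [hcm])]; exact List.mem_cons_self)
      obtain ⟨hval, hkey⟩ := hhd
      have hmem : cm ∈ TOTAL_COT_MODES := by simpa using hval
      obtain ⟨cots, hcots⟩ := Option.isSome_iff_exists.mp hkey
      have hrest : ∀ x ∈ rest.takeWhile (· ≠ ""),
          TOTAL_COT_MODES.contains x = true ∧ ((PySem.Dict.ofList examples).get? ("cot_" ++ x)).isSome = true := by
        intro x hx
        apply h
        rw [List.takeWhile_cons_of_pos (by simp [hcm])]
        exact List.mem_cons_of_mem _ hx
      -- unfold one step of both sides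
      rw [show pvALoop examples (cm :: rest) targets
            = pvALoop examples rest (List.zipWith (fun target cot => cot ++ target) targets cots) by
          simp [pvALoop, hcm, hmem, hcots]]
      rw [ih _ hrest]
      have hcol : pvCollect (cm :: rest) = cm :: pvCollect rest := by
        simp [pvCollect, hcm, hmem]
      simp only [hcol, List.reverse_cons, List.map_append, List.map_cons, List.map_nil, hcots,
        Option.getD_some]
      set L := (pvCollect rest).reverse.map
        (fun cm => ((PySem.Dict.ofList examples).get? ("cot_" ++ cm)).getD []) with hL
      -- lengths of the two range bounds agree
      have hlen : (List.zipWith (fun target cot => cot ++ target) targets cots).length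
          = min targets.length cots.length := by simp
      have hn : L.foldl (fun m l => min m l.length)
            (List.zipWith (fun target cot => cot ++ target) targets cots).length
          = (L ++ [cots]).foldl (fun m l => min m l.length) targets.length := by
        rw [List.foldl_append, hlen]
        simp only [List.foldl_cons, List.foldl_nil]
        rw [pv_foldl_min_comm (fun l => l.length) L targets.length cots.length]
      rw [← hn]
      apply List.map_congr_left
      intro i hi
      have hi' : i < (List.zipWith (fun target cot => cot ++ target) targets cots).length := by
        have hmemi := List.mem_range.mp hi
        exact lt_of_lt_of_le hmemi (pv_foldl_min_le_init L _)
      have h1 : i < targets.length := by rw [hlen] at hi'; omega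
      have h2 : i < cots.length := by rw [hlen] at hi'; omega
      rw [List.foldl_append]
      simp only [List.foldl_cons, List.foldl_nil]
      rw [pv_getD_zipWith targets cots i h1 h2, String.append_assoc]

-- ===== VERDICT (by name: the statement is the Claim_ definition above) =====
theorem add_cot_to_target_spec : Claim_equal_add_cot_to_target := by
  intro examples targets cot_mode _ hpre
  unfold Spec_add_cot_to_target add_cot_to_target add_cot_to_target_alt
  exact pv_loop_eq examples _ targets hpre
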